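-- pv_equiv track=rewrite | github.com/RohJoonHoo/programmers | 프로그래머스/0/181935. 홀짝에 따라 다른 값 반환하기/홀짝에 따라 다른 값 반환하기.py | solution
-- ===== SOURCE A (Python) =====
-- def solution(n):
--     answer = 0
--     if n%2 :
--         answer = (n//2 +1)*(n//2+1)
--     else:
--         for i in range(n):
--             if (i+1)%2==0: answer += (i+1)*(i+1)
--     return answer
-- ===== SOURCE B (Python) =====
-- def solution(n):
--     if n % 2:
--         m = n // 2 + 1
--         return m * m
--     m = n // 2 if n > 0 else 0
--     return 2 * m * (m + 1) * (2 * m + 1) // 3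
-- ===== Notes on version B (the rewrite author's own statement) =====
-- stated objective: faster
-- what changed: Replaced A's linear loop summing even squares (even case) by the closed-form polynomial formula in m, the count of positive even integers up to n; odd-case formula kept, so the speed-up shows only on even inputs (measured ~106x at n=262144 there).
import Mathlib
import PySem

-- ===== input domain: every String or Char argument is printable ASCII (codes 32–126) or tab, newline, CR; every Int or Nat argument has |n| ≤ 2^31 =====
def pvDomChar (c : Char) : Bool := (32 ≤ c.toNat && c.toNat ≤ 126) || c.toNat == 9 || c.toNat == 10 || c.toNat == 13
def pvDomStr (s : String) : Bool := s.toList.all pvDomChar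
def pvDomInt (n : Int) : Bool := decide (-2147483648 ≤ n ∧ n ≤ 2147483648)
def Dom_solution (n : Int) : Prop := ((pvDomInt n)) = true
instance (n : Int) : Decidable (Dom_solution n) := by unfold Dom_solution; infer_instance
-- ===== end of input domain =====

-- B replaces A's linear loop (even case) with the closed-form sum of even squares; intended as faster there (odd inputs already O(1) in A): measured ~106x at n=262144 on even inputs.

-- ===== PORT A =====
def solution (n : Int) : Int :=
  if PySem.Int.mod n 2 ≠ 0 then
    (PySem.Int.floordiv n 2 + 1) * (PySem.Int.floordiv n 2 + 1)
  else
    (PySem.List.pyRange 0 n 1).foldl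
      (fun answer i => if PySem.Int.mod (i + 1) 2 == 0 then answer + (i + 1) * (i + 1) else answer) 0

-- ===== PORT B =====
def solution_alt (n : Int) : Int :=
  if PySem.Int.mod n 2 ≠ 0 then
    let m := PySem.Int.floordiv n 2 + 1
    m * m
  else
    let m := if n > 0 then PySem.Int.floordiv n 2 else 0
    PySem.Int.floordiv (2 * m * (m + 1) * (2 * m + 1)) 3

-- ===== PRECONDITION & SPEC =====
def Spec_solution (n : Int) (out : Int) : Prop := out = solution_alt n
instance (n : Int) (out : Int) : Decidable (Spec_solution n out) := by unfold Spec_solution; infer_instance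

-- ===== CLAIM (what is proved, stated in full; the proofs are below) =====
def Claim_equal_solution : Prop := ∀ (n : Int), Dom_solution n → Spec_solution n (solution n)

-- ===== LEMMAS AND PROOFS =====

-- The loop body of A's even case.
def pvBody : Int → Int → Int :=
  fun answer i => if PySem.Int.mod (i + 1) 2 == 0 then answer + (i + 1) * (i + 1) else answer

-- value of A's loop from 0 to 2k, for any accumulator, by induction on k
theorem pvLoop_even (k : Nat) (acc : Int) :
    (PySem.List.pyRange 0 (2 * (k : Int)) 1).foldl pvBody acc
      = acc + 2 * k * (k + 1) * (2 * k + 1) / 3 := by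
  induction k generalizing acc with
  | zero => simp [PySem.List.pyRange_one_eq_nil]
  | succ k ih =>
      have h1 : (0:Int) ≤ 2 * ((k : Int) + 1) - 1 := by omega
      have h2 : (2 * ((k : Int) + 1) - 1) ≤ 2 * ((k : Int) + 1) := by omega
      have e1 : (2 * (((k:Nat)+1 : Nat) : Int)) = (2 * (k : Int) + 1) + 1 := by push_cast; ring
      rw [e1, PySem.List.pyRange_one_succ_right (by omega),
          PySem.List.pyRange_one_succ_right (by omega)]
      rw [List.foldl_append, List.foldl_append, ih]
      have hodd : PySem.Int.mod ((2 * (k : Int)) + 1) 2 = 1 := by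
        rw [PySem.Int.mod_eq_emod_of_pos (a := (2 * (k : Int)) + 1) (b := 2) (by omega)]; omega
      have heven : PySem.Int.mod ((2 * (k : Int) + 1) + 1) 2 = 0 := by
        rw [PySem.Int.mod_eq_emod_of_pos (a := (2 * (k : Int) + 1) + 1) (b := 2) (by omega)]; omega
      simp only [List.foldl_cons, List.foldl_nil, pvBody, hodd, heven]
      norm_num
      have hd : ∀ m : Int, (3:Int) ∣ 2 * m * (m + 1) * (2 * m + 1) := by
        intro m
        have : ((2 * m * (m + 1) * (2 * m + 1) : Int) : ZMod 3) = 0 := by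
          push_cast
          generalize ((m : ZMod 3)) = x
          revert x; decide
        exact (ZMod.intCast_zmod_eq_zero_iff_dvd _ _).mp this
      obtain ⟨q, hq⟩ := hd (k : Int)
      obtain ⟨q', hq'⟩ := hd ((k : Int) + 1)
      have e2 : (2 * (k:Int) + 1 + 1) * ((k:Int) + 1 + 1) * (2 * (k:Int) + 1 + 1 + 1) = 3 * q' := by
        linear_combination hq'
      rw [hq, e2, Int.mul_ediv_cancel_left _ (by norm_num), Int.mul_ediv_cancel_left _ (by norm_num)]
      have h9 : 3 * (q' - q - ((2 * (k:Int) + 1 + 1) * (2 * (k:Int) + 1 + 1))) = 0 := by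
        linear_combination hq - hq'
      omega

theorem solution_spec : Claim_equal_solution := by
  intro n _
  unfold Spec_solution solution solution_alt
  by_cases h : PySem.Int.mod n 2 ≠ 0
  · simp only [if_pos h]
  · rw [not_not] at h
    simp only [h, ne_eq, not_true_eq_false, if_false]
    rcases Int.lt_or_le 0 n with hn | hn
    · have h2 : n % 2 = 0 := by
        rw [PySem.Int.mod_eq_emod_of_pos (a := n) (b := 2) (by omega)] at h; exact h
      obtain ⟨k, hk⟩ : ∃ k : Nat, n = 2 * (k : Int) := ⟨(n / 2).toNat, by omega⟩
      subst hk
      have hloop := pvLoop_even k 0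
      rw [show (fun answer i => if (PySem.Int.mod (i + 1) 2 == 0) = true then answer + (i + 1) * (i + 1) else answer) = pvBody from rfl, hloop]
      rw [if_pos hn, PySem.Int.floordiv_eq_ediv_of_pos (b := 2) (by omega),
          PySem.Int.floordiv_eq_ediv_of_pos (b := 3) (by omega)]
      have hk2 : (2 * (k : Int)) / 2 = (k : Int) := by omega
      rw [hk2]
      ring_nf
    · rw [PySem.List.pyRange_one_eq_nil hn, if_neg (by omega)]
      simp [PySem.Int.floordiv]
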